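-- pv_equiv track=rewrite | github.com/TommasoBer/ADM_HW3 | invIndex_and_utils.py | inverted_index
-- ===== SOURCE A (Python) =====
-- from collections import defaultdict
--
-- def inverted_index(corpus,vocabulary):
--
--     inv_index = defaultdict(list)
--     vocabolario = vocabulary
--     for word_num in vocabolario :
--         for i in range(0,len(corpus)):
--             if word_num in corpus[i] :
--                 inv_index[word_num].append(i)
--
--     return inv_index
-- ===== SOURCE B (Python) =====
-- def inverted_index(corpus, vocabulary):
--     vocab = set(vocabulary)
--     occ = {}
--     for i, doc in enumerate(corpus):
--         for tok in set(doc):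
--             if tok in vocab:
--                 occ.setdefault(tok, []).append(i)
--     # a word listed several times in the vocabulary accumulates its posting
--     # list once per listing, exactly as the original's repeated scan does
--     result = {}
--     for w in vocabulary:
--         if w in occ:
--             result.setdefault(w, []).extend(occ[w])
--     return result
-- ===== Notes on version B (the rewrite author's own statement) =====
-- stated objective: faster
-- what changed: Instead of scanning every document once per vocabulary word, B makes a single pass over the corpus appending each document index to the posting list of every distinct in-vocabulary token of the document, then emits the lists in vocabulary order (accumulating once per listing for repeated vocabulary words, as A does).
import Mathlib
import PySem

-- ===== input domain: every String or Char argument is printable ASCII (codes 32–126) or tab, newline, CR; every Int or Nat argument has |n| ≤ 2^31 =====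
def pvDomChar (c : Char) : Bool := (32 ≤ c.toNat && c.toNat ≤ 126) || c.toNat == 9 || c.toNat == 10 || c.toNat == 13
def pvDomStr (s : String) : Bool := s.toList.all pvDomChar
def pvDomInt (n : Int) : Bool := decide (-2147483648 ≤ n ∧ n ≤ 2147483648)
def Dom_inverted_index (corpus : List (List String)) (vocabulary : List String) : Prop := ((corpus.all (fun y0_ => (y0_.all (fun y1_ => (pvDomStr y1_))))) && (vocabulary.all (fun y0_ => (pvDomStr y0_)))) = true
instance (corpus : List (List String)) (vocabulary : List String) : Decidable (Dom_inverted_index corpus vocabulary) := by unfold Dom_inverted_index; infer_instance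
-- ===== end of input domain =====

-- B replaces A's per-vocabulary-word scan of every document by one pass over the corpus that
-- appends each document index to the posting lists of the document's distinct in-vocabulary
-- tokens, then emits the lists in vocabulary order (objective: faster).

-- ===== PORT A =====
def inverted_index (corpus : List (List String)) (vocabulary : List String) : List (String × List Int) :=
  (vocabulary.foldl (fun d w =>
      (PySem.List.pyRange 0 (corpus.length : Int) 1).foldl (fun d i =>
        if w ∈ PySem.List.pyGetD corpus i [] then d.modify w [] (fun l => l ++ [i]) else d) d)
    PySem.Dict.empty).items

-- ===== PORT B =====
def inverted_index_alt (corpus : List (List String)) (vocabulary : List String) : List (String × List Int) :=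
  let vocab : PySem.Set String := PySem.Set.ofList vocabulary
  let occ : PySem.Dict String (List Int) :=
    (PySem.List.enumerate corpus).foldl (fun d p =>
      (PySem.Set.ofList p.2).foldl (fun d tok =>
        if PySem.Set.contains vocab tok then d.modify tok [] (fun l => l ++ [p.1]) else d) d)
      PySem.Dict.empty
  (vocabulary.foldl (fun r w =>
      match occ.get? w with
      | some l => r.insert w (r.getD w [] ++ l)
      | none => r) PySem.Dict.empty).items

-- ===== PRECONDITION & SPEC =====
def Spec_inverted_index (corpus : List (List String)) (vocabulary : List String) (out : List (String × List Int)) : Prop := out = inverted_index_alt corpus vocabulary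
instance (corpus : List (List String)) (vocabulary : List String) (out : List (String × List Int)) : Decidable (Spec_inverted_index corpus vocabulary out) := by unfold Spec_inverted_index; infer_instance

-- ===== CLAIM (what is proved, stated in full; the proofs are below) =====
def Claim_equal_inverted_index : Prop := ∀ (corpus : List (List String)) (vocabulary : List String), Dom_inverted_index corpus vocabulary → Spec_inverted_index corpus vocabulary (inverted_index corpus vocabulary)

-- ===== LEMMAS AND PROOFS =====

-- the ascending list of indices (counted from s) of the documents containing w
def hitsFrom : List (List String) → Int → String → List Int
  | [], _, _ => []
  | doc :: rest, s, w => (if w ∈ doc then [s] else []) ++ hitsFrom rest (s + 1) w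

lemma hitsFrom_append (xs : List (List String)) (doc : List String) (s : Int) (w : String) :
    hitsFrom (xs ++ [doc]) s w
      = hitsFrom xs s w ++ (if w ∈ doc then [s + xs.length] else []) := by
  induction xs generalizing s with
  | nil => simp [hitsFrom]
  | cons d rest ih =>
    simp only [List.cons_append, hitsFrom, ih, List.length_cons]
    rw [List.append_assoc]
    push_cast
    ring_nf

-- A's inner loop over one vocabulary word, for an arbitrary index list
lemma innerA_eq (w : String) (P : Int → Prop) [DecidablePred P] :
    ∀ (is : List Int) (d : PySem.Dict String (List Int)),
    is.foldl (fun d i => if P i then d.modify w [] (fun l => l ++ [i]) else d) d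
      = (if is.filter (fun i => decide (P i)) = [] then d
         else d.insert w (d.getD w [] ++ is.filter (fun i => decide (P i)))) := by
  intro is
  induction is with
  | nil => intro d; simp
  | cons i is ih =>
    intro d
    by_cases hP : P i
    · simp only [List.foldl_cons, if_pos hP, List.filter_cons, decide_eq_true hP]
      rw [ih]
      by_cases hrest : is.filter (fun i => decide (P i)) = []
      · simp [hrest, PySem.Dict.modify]
      · simp only [hrest, ite_false, PySem.Dict.modify,
          PySem.Dict.getD_insert_self, PySem.Dict.insert_insert_self]
        simp [List.append_assoc]
    · simp only [List.foldl_cons, if_neg hP, List.filter_cons, decide_eq_false hP]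
      rw [ih]
      simp

-- the filtered index range is exactly hitsFrom
lemma filter_range_eq_hitsFrom (corpus : List (List String)) (w : String) :
    (PySem.List.pyRange 0 (corpus.length : Int) 1).filter
        (fun i => decide (w ∈ PySem.List.pyGetD corpus i [])) = hitsFrom corpus 0 w := by
  induction corpus using List.reverseRecOn with
  | nil => simp [hitsFrom, PySem.List.pyRange_one_eq_nil]
  | append_singleton xs doc ih =>
    have hlen : ((xs ++ [doc]).length : Int) = (xs.length : Int) + 1 := by
      simp
    rw [hlen, PySem.List.pyRange_one_succ_right (by positivity), List.filter_append,
        hitsFrom_append]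
    congr 1
    · rw [← ih]
      apply List.filter_congr
      intro i hi
      rw [PySem.List.mem_pyRange_one] at hi
      have h0 : (0:Int) ≤ i := hi.1
      have h1 : i < (xs.length : Int) := hi.2
      rw [PySem.List.pyGetD_eq_getElem (xs ++ [doc]) _ h0 (by simp only [List.length_append, List.length_cons, List.length_nil]; push_cast; omega),
          PySem.List.pyGetD_eq_getElem xs _ h0 (by simpa using h1)]
      congr 1
      rw [List.getElem_append_left]
    · have : PySem.List.pyGetD (xs ++ [doc]) (xs.length : Int) [] = doc := by
        rw [PySem.List.pyGetD_natCast]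
        simp [List.getD]
      rw [List.filter_singleton]
      simp [this]

-- A's outer fold equals the canonical accumulate-in-vocabulary-order fold
lemma A_fold_eq_target (corpus : List (List String)) (vs : List String)
    (d : PySem.Dict String (List Int)) :
    vs.foldl (fun d w =>
        (PySem.List.pyRange 0 (corpus.length : Int) 1).foldl (fun d i =>
          if w ∈ PySem.List.pyGetD corpus i [] then d.modify w [] (fun l => l ++ [i]) else d) d) d
      = vs.foldl (fun d w =>
          if hitsFrom corpus 0 w = [] then d
          else d.insert w (d.getD w [] ++ hitsFrom corpus 0 w)) d := by
  have hstep : (fun (d : PySem.Dict String (List Int)) (w : String) =>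
      (PySem.List.pyRange 0 (corpus.length : Int) 1).foldl (fun d i =>
        if w ∈ PySem.List.pyGetD corpus i [] then d.modify w [] (fun l => l ++ [i]) else d) d)
      = fun d w =>
          if hitsFrom corpus 0 w = [] then d
          else d.insert w (d.getD w [] ++ hitsFrom corpus 0 w) := by
    funext d w
    rw [innerA_eq w (fun i => w ∈ PySem.List.pyGetD corpus i []) _ d,
        filter_range_eq_hitsFrom corpus w]
  rw [hstep]

-- B's inner loop over one document's distinct tokens, read through get?
lemma innerB_get? (vb : PySem.Set String) (i : Int) :
    ∀ (toks : List String), toks.Nodup → ∀ (d : PySem.Dict String (List Int)) (w : String),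
    (toks.foldl (fun d t =>
        if PySem.Set.contains vb t then d.modify t [] (fun l => l ++ [i]) else d) d).get? w
      = if PySem.Set.contains vb w = true ∧ w ∈ toks
        then some (d.getD w [] ++ [i]) else d.get? w := by
  intro toks
  induction toks with
  | nil => intro _ d w; simp
  | cons t toks ih =>
    intro hnd d w
    have hnd' : toks.Nodup := hnd.of_cons
    simp only [List.foldl_cons]
    by_cases hvt : PySem.Set.contains vb t = true
    · rw [if_pos hvt, ih hnd' _ w]
      by_cases hwt : w = t
      · subst hwt
        have hwn : w ∉ toks := (List.nodup_cons.mp hnd).1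
        simp only [hwn, and_false, if_false, PySem.Dict.modify,
          PySem.Dict.get?_insert_self, hvt, List.mem_cons, true_or, and_true]
        simp
      · have h1 : (PySem.Dict.modify d t [] (fun l => l ++ [i])).get? w = d.get? w := by
          simp only [PySem.Dict.modify]
          exact PySem.Dict.get?_insert_of_ne _ _ hwt
        have h2 : (PySem.Dict.modify d t [] (fun l => l ++ [i])).getD w [] = d.getD w [] := by
          rw [PySem.Dict.getD_eq_get?_getD, h1, ← PySem.Dict.getD_eq_get?_getD]
        rw [h2, h1]
        simp [List.mem_cons, hwt]
    · rw [if_neg hvt, ih hnd' _ w]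
      by_cases hwt : w = t
      · subst hwt
        have hv' : w ∉ vb := by simpa [PySem.Set.contains] using hvt
        simp [hv']
      · simp [List.mem_cons, hwt]

-- B's occ dict, read through get?
lemma occ_get? (vb : PySem.Set String) :
    ∀ (xs : List (List String)) (s : Int) (d : PySem.Dict String (List Int)) (w : String),
    ((PySem.List.enumerate xs s).foldl (fun d p =>
        (PySem.Set.ofList p.2).foldl (fun d tok =>
          if PySem.Set.contains vb tok then d.modify tok [] (fun l => l ++ [p.1]) else d) d) d).get? w
      = if PySem.Set.contains vb w = true ∧ hitsFrom xs s w ≠ []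
        then some (d.getD w [] ++ hitsFrom xs s w) else d.get? w := by
  intro xs
  induction xs with
  | nil => intro s d w; simp [PySem.List.enumerate, hitsFrom]
  | cons doc rest ih =>
    intro s d w
    rw [PySem.List.enumerate_cons]
    simp only [List.foldl_cons]
    set d' := (PySem.Set.ofList doc).foldl (fun d tok =>
      if PySem.Set.contains vb tok then d.modify tok [] (fun l => l ++ [s]) else d) d with hd'
    rw [ih (s + 1) d' w]
    have hget' : d'.get? w
        = if PySem.Set.contains vb w = true ∧ w ∈ PySem.Set.ofList doc
          then some (d.getD w [] ++ [s]) else d.get? w :=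
      innerB_get? vb s (PySem.Set.ofList doc) (PySem.Set.nodup_ofList doc) d w
    by_cases hvw : PySem.Set.contains vb w = true
    · have hvm : w ∈ vb := by simpa [PySem.Set.contains] using hvw
      by_cases hmem : w ∈ doc
      · have hmem' : w ∈ PySem.Set.ofList doc := (PySem.Set.mem_ofList doc w).mpr hmem
        have h1 : d'.get? w = some (d.getD w [] ++ [s]) := by
          rw [hget']; simp [hvm, hmem']
        have h2 : d'.getD w [] = d.getD w [] ++ [s] := by
          rw [PySem.Dict.getD_eq_get?_getD, h1]; rfl
        have hh : hitsFrom (doc :: rest) s w = s :: hitsFrom rest (s + 1) w := by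
          simp [hitsFrom, hmem]
        by_cases hrest : hitsFrom rest (s + 1) w = []
        · simp [hrest, hvm, h1, hh]
        · simp [hrest, hvm, h2, hh]
      · have hmem' : w ∉ PySem.Set.ofList doc := fun h => hmem ((PySem.Set.mem_ofList doc w).mp h)
        have h1 : d'.get? w = d.get? w := by rw [hget']; simp [hmem']
        have h2 : d'.getD w [] = d.getD w [] := by
          rw [PySem.Dict.getD_eq_get?_getD, h1, ← PySem.Dict.getD_eq_get?_getD]
        have hh : hitsFrom (doc :: rest) s w = hitsFrom rest (s + 1) w := by
          simp [hitsFrom, hmem]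
        rw [hh]
        by_cases hrest : hitsFrom rest (s + 1) w = []
        · simp [hrest, hvm, h1]
        · simp [hrest, hvm, h2]
    · have hvm : w ∉ vb := by simpa [PySem.Set.contains] using hvw
      have h1 : d'.get? w = d.get? w := by rw [hget']; simp [hvm]
      simp [hvm, h1]

-- for w in the vocabulary, occ.get? w is the hit list (or none if w occurs nowhere)
lemma occ_get?_of_mem (corpus : List (List String)) (vocabulary : List String)
    (w : String) (hw : w ∈ vocabulary) :
    ((PySem.List.enumerate corpus).foldl (fun d p =>
        (PySem.Set.ofList p.2).foldl (fun d tok =>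
          if PySem.Set.contains (PySem.Set.ofList vocabulary) tok
          then d.modify tok [] (fun l => l ++ [p.1]) else d) d)
      PySem.Dict.empty).get? w
      = if hitsFrom corpus 0 w = [] then none else some (hitsFrom corpus 0 w) := by
  rw [occ_get? (PySem.Set.ofList vocabulary) corpus 0 PySem.Dict.empty w]
  have hvw : PySem.Set.contains (PySem.Set.ofList vocabulary) w = true := by
    simp only [PySem.Set.contains, List.contains_iff_mem]
    exact (PySem.Set.mem_ofList vocabulary w).mpr hw
  by_cases h : hitsFrom corpus 0 w = [] <;>
    simp [h, hw, PySem.Dict.getD_empty, PySem.Dict.get?_empty]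

-- ===== VERDICT (by name: the statement is the Claim_ definition above) =====
theorem inverted_index_spec : Claim_equal_inverted_index := by
  intro corpus vocabulary _
  unfold Spec_inverted_index inverted_index inverted_index_alt
  congr 1
  rw [A_fold_eq_target corpus vocabulary PySem.Dict.empty]
  apply (PySem.List.foldl_congr_mem vocabulary _ _ PySem.Dict.empty ?_).symm
  intro r w hw
  rw [occ_get?_of_mem corpus vocabulary w hw]
  by_cases h : hitsFrom corpus 0 w = [] <;> simp [h]
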